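-- pv_equiv track=rewrite | github.com/chakraa1/Data-Structures-and-Algorithms | Recursion/CountAllSubsets.py | calSubsets
-- ===== SOURCE A (Python) =====
-- def calSubsets(N):
--     if N == 0:
--         return 1
--     prod = calSubsets(N//2)
--
--     if N % 2 == 0:
--         return prod * prod
--     else:
--         return 2 * prod * prod
-- ===== SOURCE B (Python) =====
-- def calSubsets(N):
--     return 1 << N
-- ===== Notes on version B (the rewrite author's own statement) =====
-- stated objective: simpler
-- what changed: Replaces the divide-and-conquer squaring recursion on N//2 with the closed-form bit shift 1 << N.
import Mathlib
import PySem

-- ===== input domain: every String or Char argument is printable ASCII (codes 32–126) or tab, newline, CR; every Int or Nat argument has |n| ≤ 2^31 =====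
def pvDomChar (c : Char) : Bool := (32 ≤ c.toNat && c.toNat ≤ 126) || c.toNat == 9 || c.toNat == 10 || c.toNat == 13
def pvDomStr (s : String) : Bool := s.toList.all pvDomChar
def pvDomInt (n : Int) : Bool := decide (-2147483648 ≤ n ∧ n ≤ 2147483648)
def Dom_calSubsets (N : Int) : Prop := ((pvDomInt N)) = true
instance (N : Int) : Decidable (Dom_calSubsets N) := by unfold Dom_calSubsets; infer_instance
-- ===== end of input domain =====

-- ===== PORT A =====
-- Fuel-based transcription of A's recursion on N//2 (fuel N.toNat+1 suffices for N ≥ 0;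
-- for N < 0 the Python infinitely recurses, excluded by Pre_).
def calSubsetsGo : Nat → Int → Int
  | 0, _ => 0
  | fuel + 1, N =>
    if N = 0 then 1
    else
      let prod := calSubsetsGo fuel (PySem.Int.floordiv N 2)
      if PySem.Int.mod N 2 = 0 then prod * prod else 2 * prod * prod

def calSubsets (N : Int) : Int := calSubsetsGo (N.toNat + 1) N

-- ===== PORT B =====
-- '1 << N' : Python's left shift of 1 by N (ValueError for N < 0, outside Pre_); exact for N ≥ 0.
def calSubsets_alt (N : Int) : Int := (1 : Int) <<< N.toNat

-- ===== PRECONDITION & SPEC =====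
-- Pre_ excludes N < 0, on which A recurses forever (RecursionError).
def Pre_calSubsets (N : Int) : Prop := 0 ≤ N
instance (N : Int) : Decidable (Pre_calSubsets N) := by unfold Pre_calSubsets; infer_instance
def pvWitness_calSubsets : Int := 5

def Spec_calSubsets (N : Int) (out : Int) : Prop := out = calSubsets_alt N
instance (N : Int) (out : Int) : Decidable (Spec_calSubsets N out) := by unfold Spec_calSubsets; infer_instance

-- ===== CLAIM =====
def Claim_equal_calSubsets : Prop := ∀ (N : Int), Dom_calSubsets N → Pre_calSubsets N → Spec_calSubsets N (calSubsets N)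

-- ===== LEMMAS AND PROOFS =====
theorem calSubsetsGo_pow (fuel : Nat) (N : Int) (h0 : 0 ≤ N) (hf : N.toNat < fuel) :
    calSubsetsGo fuel N = 2 ^ N.toNat := by
  induction fuel generalizing N with
  | zero => omega
  | succ f ih =>
    unfold calSubsetsGo
    by_cases hz : N = 0
    · simp [hz]
    · have hpos : 0 < N := lt_of_le_of_ne h0 (Ne.symm hz)
      have hfd : PySem.Int.floordiv N 2 = N / 2 := by
        simp [PySem.Int.floordiv, Int.fdiv_eq_ediv_of_nonneg _ (by norm_num : (0:Int) ≤ 2)]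
      have hhalf : (N / 2).toNat < f := by omega
      have h2 : 0 ≤ N / 2 := by positivity
      rw [if_neg hz, hfd, ih _ h2 hhalf]
      have hmod : PySem.Int.mod N 2 = N % 2 := by
        simp [PySem.Int.mod, Int.fmod_eq_emod_of_nonneg _ (by norm_num : (0:Int) ≤ 2)]
      rw [hmod]
      have hsplit : N.toNat = 2 * (N / 2).toNat + (N % 2).toNat := by omega
      rcases Int.emod_two_eq_zero_or_one N with he | he
      · rw [if_pos he, hsplit, he]
        simp only [Int.toNat_zero, Nat.add_zero, two_mul, pow_add]
      · rw [if_neg (by simp [he]), hsplit, he]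
        simp only [Int.toNat_one, two_mul, pow_add, pow_one]
        ring

theorem calSubsets_alt_pow (N : Int) :
    calSubsets_alt N = 2 ^ N.toNat := by
  unfold calSubsets_alt
  rw [Int.shiftLeft_eq]
  simp

-- ===== VERDICT =====
theorem calSubsets_spec : Claim_equal_calSubsets := by
  intro N _ hpre
  unfold Spec_calSubsets
  rw [calSubsets_alt_pow]
  exact calSubsetsGo_pow _ _ hpre (by omega)
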